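-- pv_equiv track=rewrite | github.com/kevinreber/autobuild-orchestrator | services/memory-service/src/api/routes/embeddings.py | detect_language
-- ===== SOURCE A (Python) =====
-- def detect_language(file_path: str) -> str | None:
--     """Detect programming language from file extension."""
--     extension_map = {
--         ".py": "python",
--         ".js": "javascript",
--         ".ts": "typescript",
--         ".tsx": "typescript",
--         ".jsx": "javascript",
--         ".go": "go",
--         ".rs": "rust",
--         ".java": "java",
--         ".rb": "ruby",
--         ".php": "php",
--         ".c": "c",
--         ".cpp": "cpp",
--         ".h": "c",
--         ".hpp": "cpp",
--         ".cs": "csharp",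
--         ".swift": "swift",
--         ".kt": "kotlin",
--         ".scala": "scala",
--         ".vue": "vue",
--         ".svelte": "svelte",
--     }
--
--     for ext, lang in extension_map.items():
--         if file_path.endswith(ext):
--             return lang
--
--     return None
-- ===== SOURCE B (Python) =====
-- def detect_language(file_path: str) -> str | None:
--     """Detect programming language from file extension."""
--     idx = file_path.rfind(".")
--     if idx == -1:
--         return None
--     ext = file_path[idx:]
--     if ext == ".py":
--         return "python"
--     elif ext == ".js":
--         return "javascript"
--     elif ext == ".ts":
--         return "typescript"
--     elif ext == ".tsx":
--         return "typescript"
--     elif ext == ".jsx":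
--         return "javascript"
--     elif ext == ".go":
--         return "go"
--     elif ext == ".rs":
--         return "rust"
--     elif ext == ".java":
--         return "java"
--     elif ext == ".rb":
--         return "ruby"
--     elif ext == ".php":
--         return "php"
--     elif ext == ".c":
--         return "c"
--     elif ext == ".cpp":
--         return "cpp"
--     elif ext == ".h":
--         return "c"
--     elif ext == ".hpp":
--         return "cpp"
--     elif ext == ".cs":
--         return "csharp"
--     elif ext == ".swift":
--         return "swift"
--     elif ext == ".kt":
--         return "kotlin"
--     elif ext == ".scala":
--         return "scala"
--     elif ext == ".vue":
--         return "vue"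
--     elif ext == ".svelte":
--         return "svelte"
--     else:
--         return None
-- ===== Notes on version B (the rewrite author's own statement) =====
-- stated objective: alternative
-- what changed: Instead of scanning a dict of 20 candidate suffixes testing file_path.endswith(ext) for each, B computes the actual extension once (rfind '.' plus a slice) and maps it to a language by a direct comparison chain, with no dict and no endswith scan.
import Mathlib
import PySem

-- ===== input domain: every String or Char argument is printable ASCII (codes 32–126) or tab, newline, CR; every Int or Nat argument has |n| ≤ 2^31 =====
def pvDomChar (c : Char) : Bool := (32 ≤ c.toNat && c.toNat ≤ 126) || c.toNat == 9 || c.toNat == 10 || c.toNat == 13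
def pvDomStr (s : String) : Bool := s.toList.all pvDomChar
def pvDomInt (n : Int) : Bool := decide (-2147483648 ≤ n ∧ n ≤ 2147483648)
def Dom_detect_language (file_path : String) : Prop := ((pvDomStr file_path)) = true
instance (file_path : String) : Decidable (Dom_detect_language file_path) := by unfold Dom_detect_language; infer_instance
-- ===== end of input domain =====

-- B replaces A's linear scan of 20 endswith tests over a dict by computing the extension
-- once (rfind '.' + slice) and mapping it through a direct comparison chain (alternative).

-- ===== PORT A =====
-- the literal extension_map data of A, in insertion order
def extensionPairs : List (String × String) :=
  [(".py", "python"), (".js", "javascript"), (".ts", "typescript"), (".tsx", "typescript"),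
   (".jsx", "javascript"), (".go", "go"), (".rs", "rust"), (".java", "java"),
   (".rb", "ruby"), (".php", "php"), (".c", "c"), (".cpp", "cpp"),
   (".h", "c"), (".hpp", "cpp"), (".cs", "csharp"), (".swift", "swift"),
   (".kt", "kotlin"), (".scala", "scala"), (".vue", "vue"), (".svelte", "svelte")]

-- A's `for ext, lang in extension_map.items(): if file_path.endswith(ext): return lang`
def detectScan : List (String × String) → String → Option String
  | [], _ => none
  | (ext, lang) :: rest, file_path =>
    if PySem.Str.endswith file_path ext then some lang else detectScan rest file_path

def detect_language (file_path : String) : Option String :=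
  detectScan extensionPairs file_path

-- ===== PORT B =====
-- B's if/elif chain mapping the computed extension to a language
def langOfExt (ext : String) : Option String :=
  if ext == ".py" then some "python"
  else if ext == ".js" then some "javascript"
  else if ext == ".ts" then some "typescript"
  else if ext == ".tsx" then some "typescript"
  else if ext == ".jsx" then some "javascript"
  else if ext == ".go" then some "go"
  else if ext == ".rs" then some "rust"
  else if ext == ".java" then some "java"
  else if ext == ".rb" then some "ruby"
  else if ext == ".php" then some "php"
  else if ext == ".c" then some "c"
  else if ext == ".cpp" then some "cpp"
  else if ext == ".h" then some "c"
  else if ext == ".hpp" then some "cpp"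
  else if ext == ".cs" then some "csharp"
  else if ext == ".swift" then some "swift"
  else if ext == ".kt" then some "kotlin"
  else if ext == ".scala" then some "scala"
  else if ext == ".vue" then some "vue"
  else if ext == ".svelte" then some "svelte"
  else none

def detect_language_alt (file_path : String) : Option String :=
  let idx := PySem.Str.rfind file_path "."
  if idx = -1 then none
  else langOfExt (PySem.Str.slice file_path (some idx) none)

-- ===== PRECONDITION & SPEC =====
def Spec_detect_language (file_path : String) (out : Option String) : Prop := out = detect_language_alt file_path
instance (file_path : String) (out : Option String) : Decidable (Spec_detect_language file_path out) := by unfold Spec_detect_language; infer_instance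

-- ===== CLAIM (what is proved, stated in full; the proofs are below) =====
def Claim_equal_detect_language : Prop := ∀ (file_path : String), Dom_detect_language file_path → Spec_detect_language file_path (detect_language file_path)

-- ===== LEMMAS AND PROOFS =====

-- rfind.go equation lemmas
theorem rfindGo_zero (s sub : List Char) :
    PySem.Chars.rfind.go s sub 0 = if sub.isPrefixOf s then 0 else -1 := by
  simp [PySem.Chars.rfind.go]

theorem rfindGo_succ (s sub : List Char) (j : Nat) :
    PySem.Chars.rfind.go s sub (j+1) =
      if sub.isPrefixOf (s.drop (j+1)) then ((j:Int)+1) else PySem.Chars.rfind.go s sub j := by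
  simp [PySem.Chars.rfind.go]

-- go = -1 means: no occurrence at any position ≤ n
theorem rfindGo_eq_neg_one (s sub : List Char) (n : Nat)
    (h : PySem.Chars.rfind.go s sub n = -1) : ∀ j, j ≤ n → ¬ sub <+: s.drop j := by
  induction n with
  | zero =>
    rw [rfindGo_zero] at h
    intro j hj
    interval_cases j
    intro hc
    rw [List.drop_zero] at hc
    rw [if_pos (List.isPrefixOf_iff_prefix.mpr hc)] at h
    exact absurd h (by decide)
  | succ m ih =>
    rw [rfindGo_succ] at h
    split_ifs at h with hp
    · omega
    · intro j hj
      rcases Nat.lt_or_ge j (m+1) with hlt | hge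
      · exact ih h j (by omega)
      · have : j = m + 1 := by omega
        subst this
        exact fun hc => hp (List.isPrefixOf_iff_prefix.mpr hc)

-- go returns -1 or the HIGHEST matching index ≤ n
theorem rfindGo_cases (s sub : List Char) (n : Nat) :
    PySem.Chars.rfind.go s sub n = -1 ∨
      ∃ i : Nat, PySem.Chars.rfind.go s sub n = (i : Int) ∧ i ≤ n ∧ sub <+: s.drop i ∧
        ∀ j, i < j → j ≤ n → ¬ sub <+: s.drop j := by
  induction n with
  | zero =>
    rw [rfindGo_zero]
    split_ifs with hp
    · exact Or.inr ⟨0, rfl, le_refl 0, List.isPrefixOf_iff_prefix.mp hp, fun j h1 h2 => by omega⟩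
    · exact Or.inl rfl
  | succ m ih =>
    rw [rfindGo_succ]
    split_ifs with hp
    · refine Or.inr ⟨m+1, by push_cast; ring, le_refl _, List.isPrefixOf_iff_prefix.mp hp, ?_⟩
      intro j h1 h2; omega
    · have hnp : ¬ sub <+: s.drop (m+1) := fun hc => hp (List.isPrefixOf_iff_prefix.mpr hc)
      rcases ih with h | ⟨i, hi, hile, hipref, hmax⟩
      · exact Or.inl h
      · refine Or.inr ⟨i, hi, by omega, hipref, ?_⟩
        intro j h1 h2
        rcases Nat.lt_or_ge j (m+1) with hlt | hge
        · exact hmax j h1 (by omega)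
        · have : j = m + 1 := by omega
          subst this; exact hnp

theorem singleton_prefix_iff (c : Char) (l : List Char) : [c] <+: l ↔ l.head? = some c := by
  cases l with
  | nil => simp
  | cons a t => simp [List.cons_prefix_cons, eq_comm]

-- if no '.' occurs anywhere, no dot-led extension is a suffix
theorem no_dot_no_suffix (s ext : List Char) (hd : ext.head? = some '.')
    (h : ∀ j, j ≤ s.length → ¬ ['.'] <+: s.drop j) : ¬ ext <:+ s := by
  rintro ⟨p, hp⟩
  have hlen : p.length ≤ s.length := by
    have := congrArg List.length hp
    simp at this; omega
  apply h p.length hlen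
  have hdrop : s.drop p.length = ext := by
    rw [← hp, List.drop_left]
  rw [hdrop, singleton_prefix_iff]
  exact hd

-- with i the HIGHEST dot position, `ext` (dot-led, dot-free tail) is a suffix iff it IS the
-- extension computed from i
theorem suffix_iff_drop_eq (s cs : List Char) (i : Nat) (hcs : '.' ∉ cs)
    (hpref : ['.'] <+: s.drop i)
    (hmax : ∀ j, i < j → j ≤ s.length → ¬ ['.'] <+: s.drop j) :
    ('.' :: cs <:+ s) ↔ s.drop i = '.' :: cs := by
  constructor
  · rintro ⟨p, hp⟩
    have hdropp : s.drop p.length = '.' :: cs := by rw [← hp, List.drop_left]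
    have hplen : p.length < s.length := by
      have := congrArg List.length hp
      simp at this; omega
    have hple : p.length ≤ i := by
      by_contra hc
      exact hmax p.length (by omega) (by omega)
        (by rw [hdropp, singleton_prefix_iff]; rfl)
    rcases Nat.eq_or_lt_of_le hple with heq | hlt
    · rw [← heq]; exact hdropp
    · -- p.length < i: then s[i] lies inside cs, contradicting '.' ∉ cs
      exfalso
      have hhead : (s.drop i).head? = some '.' := (singleton_prefix_iff _ _).mp hpref
      rw [List.head?_drop] at hhead
      have hgi : s[i]? = some '.' := hhead
      have hsplit : s[i]? = ('.' :: cs)[i - p.length]? := by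
        conv_lhs => rw [← hp]
        rw [List.getElem?_append_right (by omega)]
      rw [hsplit] at hgi
      have hk : i - p.length = (i - p.length - 1) + 1 := by omega
      rw [hk, List.getElem?_cons_succ] at hgi
      exact hcs (List.mem_of_getElem? hgi)
  · intro h
    rw [← h]
    exact List.drop_suffix i s

-- every key of the map is '.' followed by a dot-free nonempty tail
theorem extensionPairs_shape0 :
    ∀ p ∈ extensionPairs, p.1.toList.head? = some '.' ∧ '.' ∉ p.1.toList.tail := by
  decide

theorem head_tail_shape (l : List Char) (h1 : l.head? = some '.') (h2 : '.' ∉ l.tail) :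
    ∃ cs, l = '.' :: cs ∧ '.' ∉ cs := by
  cases l with
  | nil => simp at h1
  | cons a t =>
    simp only [List.head?_cons, Option.some.injEq] at h1
    exact ⟨t, by rw [h1], h2⟩

theorem extensionPairs_shape :
    ∀ p ∈ extensionPairs, p.1.toList.head? = some '.' ∧
      ∃ cs, p.1.toList = '.' :: cs ∧ '.' ∉ cs :=
  fun p hp => ⟨(extensionPairs_shape0 p hp).1,
    head_tail_shape _ (extensionPairs_shape0 p hp).1 (extensionPairs_shape0 p hp).2⟩

-- A's scan returns none when every endswith test fails
theorem detectScan_none (fp : String) (entries : List (String × String))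
    (h : ∀ p ∈ entries, ¬ PySem.Str.endswith fp p.1 = true) : detectScan entries fp = none := by
  induction entries with
  | nil => rfl
  | cons e rest ih =>
    obtain ⟨ext, lang⟩ := e
    rw [detectScan]
    rw [if_neg (h (ext, lang) (by simp))]
    exact ih fun p hp => h p (by simp [hp])

theorem sbeq_comm (a b : String) : (b == a) = (a == b) := by
  by_cases h : a = b
  · subst h; rfl
  · simp [h, Ne.symm h]

-- proof-side view of an if/elif chain as recursion over a pair list
def chainLookup : List (String × String) → String → Option String
  | [], _ => none
  | (e, l) :: r, K => if K == e then some l else chainLookup r K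

theorem chainLookup_eq_find (K : String) (l : List (String × String)) :
    chainLookup l K = (l.find? (fun p => p.1 == K)).map (·.2) := by
  induction l with
  | nil => rfl
  | cons e r ih =>
    obtain ⟨a, b⟩ := e
    rw [chainLookup, List.find?_cons]
    cases h : K == a
    · rw [if_neg (by simp), ih]
      rw [sbeq_comm] at h
      simp [h]
    · rw [if_pos (by simp)]
      rw [sbeq_comm] at h
      simp [h]

-- B's comparison chain is first-match lookup in A's pair list
theorem langOfExt_eq_find (K : String) :
    langOfExt K = (extensionPairs.find? (fun p => p.1 == K)).map (·.2) := by
  rw [show langOfExt K = chainLookup extensionPairs K from rfl, chainLookup_eq_find]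

-- A's scan equals first-match-by-key lookup once each endswith test is the key equality
theorem detectScan_eq_find (fp K : String) (i : Nat) (entries : List (String × String))
    (hK : K.toList = fp.toList.drop i)
    (h : ∀ p ∈ entries, (PySem.Str.endswith fp p.1 = true ↔ fp.toList.drop i = p.1.toList)) :
    detectScan entries fp = (entries.find? (fun p => p.1 == K)).map (·.2) := by
  induction entries with
  | nil => rfl
  | cons e rest ih =>
    obtain ⟨ext, lang⟩ := e
    have hkey : (ext == K) = PySem.Str.endswith fp ext := by
      rcases hb : PySem.Str.endswith fp ext with _ | _
      · simp only [beq_eq_false_iff_ne, ne_eq]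
        intro hc
        have ht : PySem.Str.endswith fp ext = true :=
          (h (ext, lang) (by simp)).mpr (by rw [← hK, hc])
        rw [ht] at hb
        cases hb
      · have := (h (ext, lang) (by simp)).mp hb
        have : ext = K := String.toList_inj.mp (by rw [hK, this])
        simp [this]
    rw [detectScan, List.find?_cons, hkey]
    cases hb : PySem.Str.endswith fp ext
    · simpa [hb] using ih fun p hp => h p (by simp [hp])
    · simp

-- ===== VERDICT (by name: the statement is the Claim_ definition above) =====
theorem detect_language_spec : Claim_equal_detect_language := by
  intro fp _
  unfold Spec_detect_language detect_language detect_language_alt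
  rw [show PySem.Str.rfind fp "." = PySem.Chars.rfind.go fp.toList ['.'] fp.toList.length from rfl]
  rcases rfindGo_cases fp.toList ['.'] fp.toList.length with hneg | ⟨i, hi, hile, hpref, hmax⟩
  · rw [hneg, if_pos rfl]
    apply detectScan_none
    intro p hp hmatch
    have hsfx : p.1.toList <:+ fp.toList := by
      rw [PySem.Str.endswith_eq] at hmatch
      exact (PySem.Chars.endswith_iff _ _).mp hmatch
    exact no_dot_no_suffix fp.toList p.1.toList (extensionPairs_shape p hp).1
      (rfindGo_eq_neg_one _ _ _ hneg) hsfx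
  · rw [hi, if_neg (by omega)]
    set K := PySem.Str.slice fp (some (i : Int)) none with hKdef
    have hK : K.toList = fp.toList.drop i := by
      rw [hKdef, PySem.Str.toList_slice, PySem.Chars.slice_eq_listSlice,
        PySem.List.slice_from_natCast]
    rw [langOfExt_eq_find]
    apply detectScan_eq_find fp K i extensionPairs hK
    intro p hp
    obtain ⟨cs, hcs, hnd⟩ := (extensionPairs_shape p hp).2
    rw [PySem.Str.endswith_eq, PySem.Chars.endswith_iff, hcs]
    exact suffix_iff_drop_eq fp.toList cs i hnd hpref hmax
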